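-- pv_equiv track=rewrite | github.com/chaojixiaokeai/openclaw-cortexnet-autopilot | assets/templates/openclaw_autopilot.py | pick_summary_line
-- ===== SOURCE A (Python) =====
-- from typing import Any, Dict, List, Optional, Tuple
--
-- def pick_summary_line(lines: List[str]) -> str:
--     skip_prefixes = (
--         "tokens used",
--         "thinking",
--         "plan update",
--         "exec",
--         "mcp",
--         "user",
--         "assistant to=",
--         "{",
--     )
--     for raw in reversed(lines):
--         line = raw.strip()
--         if not line:
--             continue
--         lower = line.lower()
--         if lower.startswith(skip_prefixes):
--             continue
--         if len(line) > 220: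
--             line = line[:220].rstrip() + "..."
--         return line
--     return "CLI执行完成（未输出可用总结）"
-- ===== SOURCE B (Python) =====
-- def pick_summary_line(lines):
--     skip_prefixes = (
--         "tokens used",
--         "thinking",
--         "plan update",
--         "exec",
--         "mcp",
--         "user",
--         "assistant to=",
--         "{",
--     )
--     chosen = None
--     for raw in lines:
--         line = raw.strip()
--         if not line:
--             continue
--         if line.lower().startswith(skip_prefixes):
--             continue
--         chosen = line
--     if chosen is None:
--         return "CLI执行完成（未输出可用总结）"
--     if len(chosen) > 220:
--         chosen = chosen[:220].rstrip() + "..."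
--     return chosen
-- ===== Notes on version B (the rewrite author's own statement) =====
-- stated objective: alternative
-- what changed: Replaces the reversed-iteration early-return scan with a forward fold that keeps the last qualifying stripped line in an accumulator and applies the truncation once after the loop.
import Mathlib
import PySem

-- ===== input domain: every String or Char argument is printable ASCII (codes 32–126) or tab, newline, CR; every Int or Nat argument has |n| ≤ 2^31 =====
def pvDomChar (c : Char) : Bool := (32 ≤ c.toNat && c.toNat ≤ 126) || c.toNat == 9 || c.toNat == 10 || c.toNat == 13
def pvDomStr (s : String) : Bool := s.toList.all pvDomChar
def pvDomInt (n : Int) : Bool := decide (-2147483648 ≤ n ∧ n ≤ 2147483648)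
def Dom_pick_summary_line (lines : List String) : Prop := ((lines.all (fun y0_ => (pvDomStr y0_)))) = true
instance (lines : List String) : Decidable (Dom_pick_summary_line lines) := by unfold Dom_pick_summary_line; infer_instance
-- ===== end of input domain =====

-- B replaces A's reversed scan with early return by a forward fold keeping the last
-- qualifying line, truncating once after the loop (alternative decomposition, same cost).

-- ===== PORT A =====
def pvSkipA : List String :=
  ["tokens used", "thinking", "plan update", "exec", "mcp", "user", "assistant to=", "{"]

-- A's `for raw in reversed(lines)` loop with early return, as recursion on lines.reverse
def pvLoopA : List String → String
  | [] => "CLI执行完成（未输出可用总结）"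
  | raw :: rest =>
    let line := PySem.Str.strip raw
    if line = "" then pvLoopA rest
    else
      let lower := PySem.Str.lower line
      if pvSkipA.any (fun p => PySem.Str.startswith lower p) then pvLoopA rest
      else if PySem.Str.len line > 220 then
        PySem.Str.rstrip (PySem.Str.slice line none (some 220)) ++ "..."
      else line

def pick_summary_line (lines : List String) : String := pvLoopA lines.reverse

-- ===== PORT B =====
def pvSkipB : List String :=
  ["tokens used", "thinking", "plan update", "exec", "mcp", "user", "assistant to=", "{"]

-- B's forward loop body: overwrite the accumulator with each qualifying stripped line
def pvStepB (acc : Option String) (raw : String) : Option String :=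
  let line := PySem.Str.strip raw
  if line = "" then acc
  else if pvSkipB.any (fun p => PySem.Str.startswith (PySem.Str.lower line) p) then acc
  else some line

def pick_summary_line_alt (lines : List String) : String :=
  match lines.foldl pvStepB none with
  | none => "CLI执行完成（未输出可用总结）"
  | some chosen =>
    if PySem.Str.len chosen > 220 then
      PySem.Str.rstrip (PySem.Str.slice chosen none (some 220)) ++ "..."
    else chosen

-- ===== PRECONDITION & SPEC =====
def Spec_pick_summary_line (lines : List String) (out : String) : Prop := out = pick_summary_line_alt lines
instance (lines : List String) (out : String) : Decidable (Spec_pick_summary_line lines out) := by unfold Spec_pick_summary_line; infer_instance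

-- ===== CLAIM (what is proved, stated in full; the proofs are below) =====
def Claim_equal_pick_summary_line : Prop := ∀ (lines : List String), Dom_pick_summary_line lines → Spec_pick_summary_line lines (pick_summary_line lines)

-- ===== LEMMAS AND PROOFS =====

-- first qualifying stripped line in a list (proof-only characterisation)
def pvFirstQ : List String → Option String
  | [] => none
  | raw :: rest =>
    let line := PySem.Str.strip raw
    if line = "" then pvFirstQ rest
    else if pvSkipA.any (fun p => PySem.Str.startswith (PySem.Str.lower line) p) then pvFirstQ rest
    else some line

def pvTrunc (line : String) : String :=
  if PySem.Str.len line > 220 then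
    PySem.Str.rstrip (PySem.Str.slice line none (some 220)) ++ "..."
  else line

lemma pvLoopA_eq_firstQ (ys : List String) :
    pvLoopA ys = (match pvFirstQ ys with
      | none => "CLI执行完成（未输出可用总结）"
      | some line => pvTrunc line) := by
  induction ys with
  | nil => rfl
  | cons y ys ih =>
    simp only [pvLoopA, pvFirstQ]
    split_ifs <;> simp_all [pvTrunc]

lemma pvFirstQ_append (l l' : List String) :
    pvFirstQ (l ++ l') = (match pvFirstQ l with
      | some v => some v
      | none => pvFirstQ l') := by
  induction l with
  | nil => rfl
  | cons y ys ih =>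
    simp only [List.cons_append, pvFirstQ]
    split_ifs <;> simp_all

lemma pvFoldB_eq_firstQ_reverse (ys : List String) (acc : Option String) :
    ys.foldl pvStepB acc = (match pvFirstQ ys.reverse with
      | some v => some v
      | none => acc) := by
  induction ys generalizing acc with
  | nil => rfl
  | cons y ys ih =>
    rw [List.foldl_cons, ih, List.reverse_cons, pvFirstQ_append]
    have hstep : pvStepB acc y =
        (match pvFirstQ [y] with | some v => some v | none => acc) := by
      simp only [pvStepB, pvFirstQ, pvSkipB, pvSkipA]
      split_ifs <;> rfl
    rcases h : pvFirstQ ys.reverse with _ | v <;> simp [hstep]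

-- ===== VERDICT (by name: the statement is the Claim_ definition above) =====
theorem pick_summary_line_spec : Claim_equal_pick_summary_line := by
  intro lines _
  unfold Spec_pick_summary_line pick_summary_line pick_summary_line_alt
  rw [pvLoopA_eq_firstQ, pvFoldB_eq_firstQ_reverse]
  rcases pvFirstQ lines.reverse with _ | v <;> simp [pvTrunc]
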